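-- pv_equiv track=rewrite | github.com/Chaewon-Leee/STUDY-Programmers | 숨어있는_숫자의_덧셈_(2)/yonggeun/yonggeun.py | solution
-- ===== SOURCE A (Python) =====
-- def solution(my_string):
--     answer = 0
--     my_new_string = ''
--     str_num_list = ['0', '1', '2', '3', '4', '5', '6', '7', '8', '9']
--     my_string_list = list(my_string)
--     for i, my_char in enumerate(my_string_list):
--         if my_char not in str_num_list:
--             my_char = "+"
--             my_new_string += my_char
--         else:
--             pass
--             my_new_string += my_char
--     my_num_list = my_new_string.split('+')
--     for i, my_num in enumerate(my_num_list):
--         if my_num != '':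
--             my_int_num = int(my_num)
--             answer += my_int_num
--         else:
--             pass
--     return answer
-- ===== SOURCE B (Python) =====
-- def solution(my_string):
--     total = 0
--     buf = ''
--     for ch in my_string:
--         if '0' <= ch <= '9':
--             buf += ch
--         else:
--             if buf:
--                 total += int(buf)
--             buf = ''
--     if buf:
--         total += int(buf)
--     return total
-- ===== Notes on version B (the rewrite author's own statement) =====
-- stated objective: simpler
-- what changed: B replaces A's three-phase pipeline (rebuild the string with every non-digit replaced by '+', split on '+', convert and sum the non-empty tokens) by a single pass over the characters that keeps a digit buffer and adds int(buffer) to a running total whenever a run ends.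
import Mathlib
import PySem

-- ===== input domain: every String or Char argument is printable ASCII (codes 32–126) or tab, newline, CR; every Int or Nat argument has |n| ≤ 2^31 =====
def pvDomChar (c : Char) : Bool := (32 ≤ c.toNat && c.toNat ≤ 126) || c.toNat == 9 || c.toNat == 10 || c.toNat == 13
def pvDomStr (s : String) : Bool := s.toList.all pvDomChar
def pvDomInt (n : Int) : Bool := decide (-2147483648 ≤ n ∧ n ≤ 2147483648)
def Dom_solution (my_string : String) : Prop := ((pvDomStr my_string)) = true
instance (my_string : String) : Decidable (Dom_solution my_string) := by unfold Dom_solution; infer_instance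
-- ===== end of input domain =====

set_option maxRecDepth 8192


-- B replaces A's build-a-'+'-joined-string-then-split-then-int pipeline by a single pass
-- keeping a digit buffer and a running total (objective: simpler).

-- ===== PORT A =====
-- `int(my_num)`: tokens reaching it are nonempty digit runs, so Python's int never raises;
-- `(PySem.Int.ofChars? t).getD 0` — the `none` case is unreachable on those tokens.
def solution (my_string : String) : Int :=
  let strNumList : List Char := ['0', '1', '2', '3', '4', '5', '6', '7', '8', '9']
  let myStringList : List Char := my_string.toList
  let myNewString : List Char :=
    myStringList.foldl
      (fun acc c => if !(strNumList.contains c) then acc ++ ['+'] else acc ++ [c]) []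
  let myNumList : List (List Char) := PySem.Chars.splitOn myNewString ['+']
  myNumList.foldl
    (fun answer t => if t ≠ [] then answer + (PySem.Int.ofChars? t).getD 0 else answer) 0

-- ===== PORT B =====
-- single pass: state (total, buf); `int(buf)` on a nonempty digit buffer, as in A's port.
def solution_alt (my_string : String) : Int :=
  let st : Int × List Char :=
    my_string.toList.foldl
      (fun (st : Int × List Char) c =>
        if '0' ≤ c ∧ c ≤ '9' then (st.1, st.2 ++ [c])
        else (if st.2 ≠ [] then st.1 + (PySem.Int.ofChars? st.2).getD 0 else st.1, []))
      (0, [])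
  if st.2 ≠ [] then st.1 + (PySem.Int.ofChars? st.2).getD 0 else st.1

-- ===== PRECONDITION & SPEC =====
def Spec_solution (my_string : String) (out : Int) : Prop := out = solution_alt my_string
instance (my_string : String) (out : Int) : Decidable (Spec_solution my_string out) := by unfold Spec_solution; infer_instance

-- ===== CLAIM (what is proved, stated in full; the proofs are below) =====
def Claim_equal_solution : Prop := ∀ (my_string : String), Dom_solution my_string → Spec_solution my_string (solution my_string)

-- ===== LEMMAS AND PROOFS =====

-- reference splitter: split a char list on '+' (front-to-back, `cur` = chunk being built)
def sos : List Char → List Char → List (List Char)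
  | [], cur => [cur]
  | c :: r, cur => if c = '+' then cur :: sos r [] else sos r (cur ++ [c])

theorem sos_plus (r cur : List Char) : sos ('+' :: r) cur = cur :: sos r [] := by
  simp [sos]

theorem sos_cons {c : Char} (hc : c ≠ '+') (r cur : List Char) : sos (c :: r) cur = sos r (cur ++ [c]) := by
  simp [sos, hc]

theorem go_spec : ∀ (fuel : Nat) (l cur : List Char) (acc : List (List Char)), l.length < fuel →
    PySem.Chars.splitOn.go ['+'] fuel l cur acc = acc.reverse ++ sos l cur.reverse := by
  intro fuel
  induction fuel with
  | zero => intro l cur acc h; omega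
  | succ f ih =>
    intro l cur acc h
    match l with
    | [] => unfold PySem.Chars.splitOn.go; simp [sos]
    | c :: rest =>
      unfold PySem.Chars.splitOn.go
      simp only [List.isPrefixOf, Bool.and_true]
      by_cases hc : c = '+'
      · subst hc
        simp only [beq_self_eq_true, if_pos]
        rw [ih _ _ _ (by simpa using Nat.lt_of_succ_lt_succ h)]
        rw [sos_plus]
        simp only [List.length_cons, List.length_nil, List.drop_succ_cons, List.drop_zero,
          List.reverse_cons, List.reverse_nil, List.append_assoc, List.singleton_append]
      · rw [if_neg (by simpa using Ne.symm hc)]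
        rw [ih _ _ _ (by simpa using Nat.lt_of_succ_lt_succ h)]
        rw [sos_cons hc]
        simp only [List.reverse_cons]

theorem splitOn_eq_sos (l : List Char) : PySem.Chars.splitOn l ['+'] = sos l [] := by
  unfold PySem.Chars.splitOn
  rw [go_spec _ _ _ _ (by omega)]
  simp

-- A's digit test (membership in the ten digit chars) coincides with B's range test
theorem contains_digits_iff (c : Char) :
    (['0', '1', '2', '3', '4', '5', '6', '7', '8', '9'].contains c) = true ↔ ('0' ≤ c ∧ c ≤ '9') := by
  rw [List.contains_iff_mem]
  constructor
  · intro h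
    fin_cases h <;> exact ⟨by decide, by decide⟩
  · rintro ⟨h1, h2⟩
    rw [Char.le_def] at h1 h2
    have h48 : 48 ≤ c.val.toNat := h1
    have h57 : c.val.toNat ≤ 57 := h2
    interval_cases h : c.val.toNat <;>
      simp_all [List.mem_cons, Char.ext_iff, UInt32.ext_iff]

-- abbreviations for the two loop bodies
def astep (a : Int) (t : List Char) : Int := if t ≠ [] then a + (PySem.Int.ofChars? t).getD 0 else a

def bstep (st : Int × List Char) (c : Char) : Int × List Char :=
  if '0' ≤ c ∧ c ≤ '9' then (st.1, st.2 ++ [c])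
  else (if st.2 ≠ [] then st.1 + (PySem.Int.ofChars? st.2).getD 0 else st.1, [])

def fchar (c : Char) : Char :=
  if !(['0', '1', '2', '3', '4', '5', '6', '7', '8', '9'].contains c) then '+' else c

-- the heart: B's single pass computes A's sum over the split of the '+'-substituted list
theorem main_lemma : ∀ (l : List Char) (T : Int) (buf : List Char),
    astep (l.foldl bstep (T, buf)).1 (l.foldl bstep (T, buf)).2
      = (sos (l.map fchar) buf).foldl astep T := by
  intro l
  induction l with
  | nil => intro T buf; simp [sos, List.foldl, astep]
  | cons c r ih =>
    intro T buf
    by_cases hc : '0' ≤ c ∧ c ≤ '9'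
    · have hmem : (['0', '1', '2', '3', '4', '5', '6', '7', '8', '9'].contains c) = true :=
        (contains_digits_iff c).mpr hc
      have hne : c ≠ '+' := by
        rintro rfl
        exact absurd hc (by decide)
      simp only [List.map_cons, List.foldl_cons, bstep, if_pos hc, fchar, hmem,
        Bool.not_true, Bool.false_eq_true, sos, hne, ite_false]
      exact ih _ _
    · have hmem : (['0', '1', '2', '3', '4', '5', '6', '7', '8', '9'].contains c) = false := by
        rcases h : (['0', '1', '2', '3', '4', '5', '6', '7', '8', '9'].contains c) with _ | _
        · rfl
        · exact absurd ((contains_digits_iff c).mp h) hc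
      simp only [List.map_cons, List.foldl_cons, bstep, if_neg hc, fchar, hmem,
        Bool.not_false, if_pos, sos]
      rw [ih]
      simp [astep]

-- A's character-substitution loop is a map
theorem newString_eq_map (l : List Char) :
    l.foldl (fun acc c =>
        if !(['0', '1', '2', '3', '4', '5', '6', '7', '8', '9'].contains c)
        then acc ++ ['+'] else acc ++ [c]) [] = l.map fchar := by
  have h : (fun (acc : List Char) (c : Char) =>
      if !(['0', '1', '2', '3', '4', '5', '6', '7', '8', '9'].contains c)
      then acc ++ ['+'] else acc ++ [c]) = fun acc c => acc ++ [fchar c] := by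
    funext acc c
    unfold fchar
    cases h : (['0', '1', '2', '3', '4', '5', '6', '7', '8', '9'].contains c) <;> rfl
  rw [h, PySem.List.foldl_append_singleton_eq_map]
  rfl

-- ===== VERDICT (by name: the statement is the Claim_ definition above) =====
theorem solution_spec : Claim_equal_solution := by
  intro s _
  unfold Spec_solution solution solution_alt
  dsimp only
  rw [newString_eq_map, splitOn_eq_sos]
  exact (main_lemma s.toList 0 []).symm
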